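-- pv_equiv track=rewrite | github.com/zhenga1/holosoma | src/holosoma_inference/holosoma_inference/run_policy.py | _split_secondary_args
-- ===== SOURCE A (Python) =====
-- def _split_secondary_args(argv: list[str]) -> tuple[list[str], list[str]]:
--     """Split --secondary.* args out of argv, renaming them for standalone parsing.
--
--     Returns (primary_argv, secondary_argv) where secondary args have the
--     ``--secondary.`` prefix stripped, e.g. ``--secondary.task.model-path X``
--     becomes ``--task.model-path X``.
--     """
--     primary = []
--     secondary = []
--     expect_secondary_value = False
--     for arg in argv:
--         if arg.startswith("--secondary."):
--             renamed = "--" + arg[len("--secondary.") :]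
--             secondary.append(renamed)
--             # If not --key=value form, the next token might be the value
--             expect_secondary_value = "=" not in renamed
--         elif expect_secondary_value and not arg.startswith("--"):
--             secondary.append(arg)
--             expect_secondary_value = False
--         else:
--             primary.append(arg)
--             expect_secondary_value = False
--     return primary, secondary
-- ===== SOURCE B (Python) =====
-- def _split_secondary_args(argv: list[str]) -> tuple[list[str], list[str]]:
--     """Split --secondary.* args out of argv, renaming them for standalone parsing."""
--     primary = []
--     secondary = []
--     i = 0
--     n = len(argv)
--     while i < n:
--         arg = argv[i]
--         if arg.startswith("--secondary."):
--             renamed = "--" + arg[len("--secondary."):]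
--             secondary.append(renamed)
--             if "=" not in renamed and i + 1 < n and not argv[i + 1].startswith("--"):
--                 secondary.append(argv[i + 1])
--                 i += 2
--             else:
--                 i += 1
--         else:
--             primary.append(arg)
--             i += 1
--     return primary, secondary
-- ===== Notes on version B (the rewrite author's own statement) =====
-- stated objective: alternative
-- what changed: Replaces A's for-loop state machine with a carried expect_secondary_value flag by an index-based while loop that uses explicit lookahead at the next token to decide whether to consume it as the secondary option's value.
import Mathlib
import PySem

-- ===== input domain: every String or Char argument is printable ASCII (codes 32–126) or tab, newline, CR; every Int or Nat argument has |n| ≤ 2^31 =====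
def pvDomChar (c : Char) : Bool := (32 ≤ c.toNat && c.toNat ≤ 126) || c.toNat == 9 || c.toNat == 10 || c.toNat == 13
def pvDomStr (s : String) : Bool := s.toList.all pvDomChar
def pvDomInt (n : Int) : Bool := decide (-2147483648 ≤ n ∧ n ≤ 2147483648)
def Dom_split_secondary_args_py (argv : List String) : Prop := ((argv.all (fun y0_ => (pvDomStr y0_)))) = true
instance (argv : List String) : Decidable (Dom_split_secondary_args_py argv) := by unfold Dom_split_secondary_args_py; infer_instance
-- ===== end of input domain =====

-- B replaces A's carried expect_secondary_value flag with an index-based loop and explicit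
-- lookahead at the next token (objective: alternative decomposition, same cost).

-- ===== PORT A =====
-- one loop step of A: state = (primary, secondary, expect_secondary_value)
def pvStepA (st : List String × List String × Bool) (arg : String) :
    List String × List String × Bool :=
  if PySem.Str.startswith arg "--secondary." then
    -- renamed = "--" + arg[len("--secondary."):]
    (st.1, st.2.1 ++ ["--" ++ PySem.Str.slice arg (some 12) none],
      !(PySem.Str.isIn "=" ("--" ++ PySem.Str.slice arg (some 12) none)))
  else if st.2.2 && !(PySem.Str.startswith arg "--") then
    (st.1, st.2.1 ++ [arg], false)
  else
    (st.1 ++ [arg], st.2.1, false)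

def split_secondary_args_py (argv : List String) : List String × List String :=
  let st := argv.foldl pvStepA ([], [], false)
  (st.1, st.2.1)

-- ===== PORT B =====
-- B's while loop over indices, as recursion on the remaining tokens with explicit lookahead
def pvGoB (p s : List String) : List String → List String × List String
  | [] => (p, s)
  | arg :: rest =>
    if PySem.Str.startswith arg "--secondary." then
      if !(PySem.Str.isIn "=" ("--" ++ PySem.Str.slice arg (some 12) none)) then
        match rest with
        | nxt :: rest' =>
          if !(PySem.Str.startswith nxt "--") then
            pvGoB p (s ++ ["--" ++ PySem.Str.slice arg (some 12) none, nxt]) rest'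
          else
            pvGoB p (s ++ ["--" ++ PySem.Str.slice arg (some 12) none]) (nxt :: rest')
        | [] => pvGoB p (s ++ ["--" ++ PySem.Str.slice arg (some 12) none]) []
      else
        pvGoB p (s ++ ["--" ++ PySem.Str.slice arg (some 12) none]) rest
    else
      pvGoB (p ++ [arg]) s rest

def split_secondary_args_py_alt (argv : List String) : List String × List String :=
  pvGoB [] [] argv

-- ===== PRECONDITION & SPEC =====
def Spec_split_secondary_args_py (argv : List String) (out : List String × List String) : Prop := out = split_secondary_args_py_alt argv
instance (argv : List String) (out : List String × List String) : Decidable (Spec_split_secondary_args_py argv out) := by unfold Spec_split_secondary_args_py; infer_instance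

-- ===== CLAIM (what is proved, stated in full; the proofs are below) =====
def Claim_equal_split_secondary_args_py : Prop := ∀ (argv : List String), Dom_split_secondary_args_py argv → Spec_split_secondary_args_py argv (split_secondary_args_py argv)

-- ===== LEMMAS AND PROOFS =====

-- a token starting with "--secondary." starts with "--"
theorem pv_dd_of_sec {a : String} (h : PySem.Str.startswith a "--secondary." = true) :
    PySem.Str.startswith a "--" = true := by
  simp only [PySem.Str.startswith_eq, PySem.Chars.startswith_iff] at h ⊢
  exact List.IsPrefix.trans ⟨"secondary.".toList, rfl⟩ h

-- when the token starts with "--", A's step ignores the flag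
theorem pvStepA_flag_irrel {p s : List String} {a : String}
    (h : PySem.Str.startswith a "--" = true) :
    pvStepA (p, s, true) a = pvStepA (p, s, false) a := by
  rcases hx : PySem.Str.startswith a "--secondary." with _ | _
  · simp only [pvStepA, hx, h, Bool.false_eq_true, if_false, Bool.not_true, Bool.and_false]
  · simp only [pvStepA, hx, if_true]

-- main invariant: A's fold from a flag-false state computes B's recursion
theorem pv_key : ∀ (n : Nat) (argv : List String), argv.length ≤ n → ∀ (p s : List String),
    ((argv.foldl pvStepA (p, s, false)).1, (argv.foldl pvStepA (p, s, false)).2.1)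
      = pvGoB p s argv := by
  intro n
  induction n with
  | zero =>
    intro argv h p s
    have : argv = [] := List.length_eq_zero_iff.mp (Nat.le_zero.mp h)
    subst this; simp [pvGoB]
  | succ n ih =>
    intro argv h p s
    cases argv with
    | nil => simp [pvGoB]
    | cons a rest =>
      simp only [List.length_cons, Nat.succ_le_succ_iff] at h
      rcases hs : PySem.Str.startswith a "--secondary." with _ | _
      · -- ordinary token goes to primary
        have hstep : pvStepA (p, s, false) a = (p ++ [a], s, false) := by
          simp only [pvStepA, hs, Bool.false_eq_true, if_false, Bool.false_and]
        rw [List.foldl_cons, hstep, ih rest h]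
        conv_rhs => rw [pvGoB.eq_def]
        simp only [hs, Bool.false_eq_true, if_false]
      · rcases he : PySem.Str.isIn "=" ("--" ++ PySem.Str.slice a (some 12) none) with _ | _
        · -- flag becomes true: look at the next token
          have hstep : pvStepA (p, s, false) a
              = (p, s ++ ["--" ++ PySem.Str.slice a (some 12) none], true) := by
            simp only [pvStepA, hs, if_true, he, Bool.not_false]
          cases rest with
          | nil =>
            rw [List.foldl_cons, hstep]
            conv_rhs => rw [pvGoB.eq_def]
            simp only [hs, if_true, he, Bool.not_false, List.foldl_nil, pvGoB]
          | cons nxt rest' =>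
            simp only [List.length_cons] at h
            rcases hn : PySem.Str.startswith nxt "--" with _ | _
            · -- next token is the value
              have hsec : PySem.Str.startswith nxt "--secondary." = false := by
                rcases hx : PySem.Str.startswith nxt "--secondary." with _ | _
                · rfl
                · rw [pv_dd_of_sec hx] at hn; exact hn
              have hstep2 : pvStepA (p, s ++ ["--" ++ PySem.Str.slice a (some 12) none], true) nxt
                  = (p, s ++ ["--" ++ PySem.Str.slice a (some 12) none] ++ [nxt], false) := by
                simp only [pvStepA, hsec, Bool.false_eq_true, if_false, hn, Bool.not_false,
                  Bool.and_true, if_true]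
              rw [List.foldl_cons, hstep, List.foldl_cons, hstep2,
                ih rest' (by omega) p (s ++ ["--" ++ PySem.Str.slice a (some 12) none] ++ [nxt])]
              conv_rhs => rw [pvGoB.eq_def]
              simp only [hs, if_true, he, Bool.not_false, hn, List.append_assoc,
                List.cons_append, List.nil_append]
            · -- next token is itself an option: A's flag is irrelevant on it
              rw [List.foldl_cons, hstep, List.foldl_cons, pvStepA_flag_irrel hn,
                ← List.foldl_cons]
              rw [ih (nxt :: rest') (by simpa using h) p
                (s ++ ["--" ++ PySem.Str.slice a (some 12) none])]
              conv_rhs => rw [pvGoB.eq_def]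
              simp only [hs, if_true, he, Bool.not_false, hn, Bool.not_true, Bool.false_eq_true,
                if_false]
        · -- "--key=value" form: the flag stays false
          have hstep : pvStepA (p, s, false) a
              = (p, s ++ ["--" ++ PySem.Str.slice a (some 12) none], false) := by
            simp only [pvStepA, hs, if_true, he, Bool.not_true]
          rw [List.foldl_cons, hstep, ih rest h]
          conv_rhs => rw [pvGoB.eq_def]
          simp only [hs, if_true, he, Bool.not_true, Bool.false_eq_true, if_false]

-- ===== VERDICT (by name: the statement is the Claim_ definition above) =====
theorem split_secondary_args_py_spec : Claim_equal_split_secondary_args_py := by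
  intro argv _
  unfold Spec_split_secondary_args_py split_secondary_args_py split_secondary_args_py_alt
  exact pv_key argv.length argv le_rfl [] []
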